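-- pv_equiv track=rewrite | github.com/noiehoie/gpucall | gpucall/recipe_admin.py | _round_context_budget
-- ===== SOURCE A (Python) =====
-- from typing import Any
--
-- def _round_context_budget(value: Any) -> int:
--     try:
--         required = int(value)
--     except (TypeError, ValueError):
--         required = 8192
--     for candidate in (8192, 32768, 65536, 131072, 262144, 524288, 1010000):
--         if required <= candidate:
--             return candidate
--     return required
-- ===== SOURCE B (Python) =====
-- import bisect
--
-- _TIERS = (8192, 32768, 65536, 131072, 262144, 524288, 1010000)
--
-- def _round_context_budget(value):
--     try:
--         required = int(value)
--     except (TypeError, ValueError):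
--         required = 8192
--     idx = bisect.bisect_left(_TIERS, required)
--     if idx < len(_TIERS):
--         return _TIERS[idx]
--     return required
-- ===== Notes on version B (the rewrite author's own statement) =====
-- stated objective: idiomatic
-- what changed: Replaces the linear scan over tiers by a bisect_left binary search over the sorted tier table, returning the tier at the found index or the value itself past the end.
import Mathlib
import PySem

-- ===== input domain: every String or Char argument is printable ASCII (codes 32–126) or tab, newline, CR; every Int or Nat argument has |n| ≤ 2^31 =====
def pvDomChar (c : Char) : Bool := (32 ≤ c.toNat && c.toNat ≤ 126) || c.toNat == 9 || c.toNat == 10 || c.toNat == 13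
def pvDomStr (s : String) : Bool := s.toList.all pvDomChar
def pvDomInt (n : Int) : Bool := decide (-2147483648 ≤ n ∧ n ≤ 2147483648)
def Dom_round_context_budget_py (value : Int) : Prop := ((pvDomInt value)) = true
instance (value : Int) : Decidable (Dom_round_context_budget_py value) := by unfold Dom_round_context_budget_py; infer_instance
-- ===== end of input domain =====

-- B replaces A's linear scan of the tier list by a bisect_left binary search over the
-- same sorted tier table (idiomatic; identical return value for every int input).

-- ===== PORT A =====
-- the for-loop with early return, as structural recursion over the tier list
def pvScanTiers (required : Int) : List Int → Int
  | [] => required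
  | c :: rest => if required ≤ c then c else pvScanTiers required rest

def round_context_budget_py (value : Int) : Int :=
  -- int(value) on an int is the identity; the except branch is unreachable for int input
  let required := value
  pvScanTiers required [8192, 32768, 65536, 131072, 262144, 524288, 1010000]

-- ===== PORT B =====
def pvTiers : List Int := [8192, 32768, 65536, 131072, 262144, 524288, 1010000]

-- bisect.bisect_left on a list of ints
def pvBisectLeftGo (xs : List Int) (x : Int) (lo hi : Nat) : Nat :=
  if h : lo < hi then
    let mid := (lo + hi) / 2
    if xs.getD mid 0 < x then pvBisectLeftGo xs x (mid + 1) hi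
    else pvBisectLeftGo xs x lo mid
  else lo
termination_by hi - lo
decreasing_by all_goals omega

def pvBisectLeft (xs : List Int) (x : Int) : Nat := pvBisectLeftGo xs x 0 xs.length

def round_context_budget_py_alt (value : Int) : Int :=
  let required := value
  let idx := pvBisectLeft pvTiers required
  if idx < pvTiers.length then pvTiers.getD idx 0 else required

-- ===== PRECONDITION & SPEC =====
def Spec_round_context_budget_py (value : Int) (out : Int) : Prop := out = round_context_budget_py_alt value
instance (value : Int) (out : Int) : Decidable (Spec_round_context_budget_py value out) := by unfold Spec_round_context_budget_py; infer_instance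

-- ===== CLAIM (what is proved, stated in full; the proofs are below) =====
def Claim_equal_round_context_budget_py : Prop := ∀ (value : Int), Dom_round_context_budget_py value → Spec_round_context_budget_py value (round_context_budget_py value)

-- ===== LEMMAS AND PROOFS =====

-- ===== VERDICT (by name: the statement is the Claim_ definition above) =====
theorem round_context_budget_py_spec : Claim_equal_round_context_budget_py := by
  intro value _
  unfold Spec_round_context_budget_py round_context_budget_py round_context_budget_py_alt
    pvBisectLeft pvTiers
  simp only [pvScanTiers]
  repeat first
    | (rw [pvBisectLeftGo]; norm_num [List.getD])
  split_ifs <;> simp_all <;> omega
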